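-- pv_equiv track=rewrite | github.com/azwpayne/crypt | src/crypt/encode/ascii.py | ascii_encode
-- ===== SOURCE A (Python) =====
-- def ascii_encode(data: str) -> list[int]:
--   """
--   将字符串编码为 ASCII 码列表
--
--   :param data: 输入字符串
--   :return: ASCII 码整数列表
--   :raises ValueError: 当包含非 ASCII 字符时
--
--   示例:
--       >>> ascii_encode("Hello")
--       [72, 101, 108, 108, 111]
--       >>> ascii_encode("")
--       []
--   """
--   if not isinstance(data, str):
--     msg = "输入必须是字符串"
--     raise TypeError(msg)
--
--   if not data:
--     return []
--
--   result = []
--   for character in data: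
--     code = ord(character)
--     if code > 127:
--       msg = f"包含非 ASCII 字符 '{character}' (Unicode: U+{code:04X})"
--       raise ValueError(msg)
--     result.append(code)
--
--   return result
-- ===== SOURCE B (Python) =====
-- def ascii_encode(data: str) -> list[int]:
--     if not isinstance(data, str):
--         msg = "输入必须是字符串"
--         raise TypeError(msg)
--     if not data.isascii():
--         character = next(c for c in data if ord(c) > 127)
--         code = ord(character)
--         msg = f"包含非 ASCII 字符 '{character}' (Unicode: U+{code:04X})"
--         raise ValueError(msg)
--     return [ord(c) for c in data]
-- ===== Notes on version B (the rewrite author's own statement) =====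
-- stated objective: idiomatic
-- what changed: Replaces the single validating loop that appends per character with a validate-first split: a str.isascii() check (raising the identical ValueError for the first offending char) followed by a plain comprehension for conversion; the empty-string guard disappears.
import Mathlib
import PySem

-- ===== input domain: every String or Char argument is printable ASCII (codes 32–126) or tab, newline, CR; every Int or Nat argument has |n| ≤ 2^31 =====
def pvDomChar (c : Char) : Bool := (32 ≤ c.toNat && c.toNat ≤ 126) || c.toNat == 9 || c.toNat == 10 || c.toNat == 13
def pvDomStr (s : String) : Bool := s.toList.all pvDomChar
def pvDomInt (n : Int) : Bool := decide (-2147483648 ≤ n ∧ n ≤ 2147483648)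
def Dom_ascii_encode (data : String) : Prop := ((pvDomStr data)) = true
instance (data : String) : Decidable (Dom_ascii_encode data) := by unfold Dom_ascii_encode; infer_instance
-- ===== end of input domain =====

-- ===== PORT A =====
-- B validates first with an isascii-style check then converts with a plain map; A checks per character while appending. Same values everywhere on Dom.
-- A's loop: per-character range check, appending to an accumulator; the raise branch (unreachable on Dom) returns the accumulator.
def asciiLoopA : List Char → List Int → List Int
  | [], result => result
  | c :: rest, result =>
      if c.toNat > 127 then result  -- Python raises ValueError here; unreachable on Dom_ascii_encode
      else asciiLoopA rest (result ++ [(c.toNat : Int)])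

def ascii_encode (data : String) : List Int :=
  if data.toList = [] then [] else asciiLoopA data.toList []

-- ===== PORT B =====
def ascii_encode_alt (data : String) : List Int :=
  if data.toList.all (fun c => c.toNat ≤ 127) then
    data.toList.map (fun c => (c.toNat : Int))
  else []  -- Python raises ValueError here; unreachable on Dom_ascii_encode

-- ===== PRECONDITION & SPEC =====
def Spec_ascii_encode (data : String) (out : List Int) : Prop := out = ascii_encode_alt data
instance (data : String) (out : List Int) : Decidable (Spec_ascii_encode data out) := by unfold Spec_ascii_encode; infer_instance

-- ===== CLAIM (what is proved, stated in full; the proofs are below) =====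
def Claim_equal_ascii_encode : Prop := ∀ (data : String), Dom_ascii_encode data → Spec_ascii_encode data (ascii_encode data)

-- ===== LEMMAS AND PROOFS =====
theorem asciiLoopA_eq_map (l : List Char) (acc : List Int)
    (h : ∀ c ∈ l, c.toNat ≤ 127) :
    asciiLoopA l acc = acc ++ l.map (fun c => (c.toNat : Int)) := by
  induction l generalizing acc with
  | nil => simp [asciiLoopA]
  | cons c rest ih =>
    have hc : ¬ c.toNat > 127 := by
      have := h c (List.mem_cons_self ..)
      omega
    simp only [asciiLoopA, if_neg hc, List.map_cons]
    rw [ih _ (fun d hd => h d (List.mem_cons_of_mem _ hd))]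
    simp

-- ===== VERDICT (by name: the statement is the Claim_ definition above) =====
theorem ascii_encode_spec : Claim_equal_ascii_encode := by
  intro data hdom
  have hall : ∀ c ∈ data.toList, c.toNat ≤ 127 := by
    intro c hc
    have := List.all_eq_true.mp hdom c hc
    simp only [pvDomChar, Bool.or_eq_true, Bool.and_eq_true, decide_eq_true_eq, beq_iff_eq] at this
    omega
  show ascii_encode data = ascii_encode_alt data
  have hb : data.toList.all (fun c => c.toNat ≤ 127) = true := by
    exact List.all_eq_true.mpr (fun c hc => decide_eq_true (hall c hc))
  unfold ascii_encode ascii_encode_alt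
  rw [if_pos hb]
  by_cases he : data.toList = []
  · simp [he]
  · rw [if_neg he, asciiLoopA_eq_map _ _ hall, List.nil_append]
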